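-- pv_equiv track=rewrite | github.com/Abdullajon1881/AuthentiGuard | scripts/compute_daily_metrics.py | _bucketize_lengths
-- ===== SOURCE A (Python) =====
-- LENGTH_BUCKETS = [
--     (0, 100, "0-100"),
--     (100, 500, "100-500"),
--     (500, 2000, "500-2000"),
--     (2000, 10000, "2000-10000"),
--     (10000, float("inf"), "10000+"),
-- ]
--
-- def _bucketize_lengths(lengths: list[int]) -> dict[str, int]:
--     counts = {label: 0 for _, _, label in LENGTH_BUCKETS}
--     for n in lengths:
--         for lo, hi, label in LENGTH_BUCKETS:
--             if lo <= n < hi: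
--                 counts[label] += 1
--                 break
--     return counts
-- ===== SOURCE B (Python) =====
-- import bisect
--
-- _BOUNDARIES = [100, 500, 2000, 10000]
-- _LABELS = ["0-100", "100-500", "500-2000", "2000-10000", "10000+"]
--
--
-- def _bucketize_lengths(lengths: list[int]) -> dict[str, int]:
--     counts = {label: 0 for label in _LABELS}
--     for n in lengths:
--         if n >= 0:
--             counts[_LABELS[bisect.bisect_right(_BOUNDARIES, n)]] += 1
--     return counts
-- ===== Notes on version B (the rewrite author's own statement) =====
-- stated objective: idiomatic
-- what changed: Replaces the inner scan over (lo, hi, label) bucket triples with a binary search (bisect.bisect_right, implemented in C) into a sorted boundary table indexing a parallel label list; negatives are dropped by the same n >= 0 guard A's first bucket bound implies.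
import Mathlib
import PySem

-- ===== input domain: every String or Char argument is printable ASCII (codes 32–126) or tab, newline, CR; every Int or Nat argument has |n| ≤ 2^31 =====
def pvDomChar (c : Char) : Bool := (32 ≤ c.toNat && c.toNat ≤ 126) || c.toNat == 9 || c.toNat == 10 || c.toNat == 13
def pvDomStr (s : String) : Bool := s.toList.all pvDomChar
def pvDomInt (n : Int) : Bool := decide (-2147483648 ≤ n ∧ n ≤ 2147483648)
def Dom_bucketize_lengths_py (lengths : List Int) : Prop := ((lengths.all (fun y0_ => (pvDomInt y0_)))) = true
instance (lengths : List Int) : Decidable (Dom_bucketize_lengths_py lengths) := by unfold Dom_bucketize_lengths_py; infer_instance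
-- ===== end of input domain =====

-- B replaces A's inner scan over bucket triples by a bisect_right binary search into a
-- sorted boundary table with a parallel label list; same return value on every input.
-- ===== PORT A =====
-- LENGTH_BUCKETS: float("inf") as upper bound is ported by hand as Option Int (none = +inf,
-- so 'n < inf' is always true) — exact, since every Int is below +inf.
def pvBuckets : List (Int × Option Int × String) :=
  [(0, some 100, "0-100"), (100, some 500, "100-500"), (500, some 2000, "500-2000"),
   (2000, some 10000, "2000-10000"), (10000, none, "10000+")]

-- the inner 'for lo, hi, label in LENGTH_BUCKETS: if lo <= n < hi: counts[label] += 1; break'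
def pvInnerA (n : Int) (d : PySem.Dict String Int) : List (Int × Option Int × String) → PySem.Dict String Int
  | [] => d
  | (lo, hi, label) :: rest =>
    if decide (lo ≤ n) && (match hi with | none => true | some h => decide (n < h)) then
      d.modify label 0 (· + 1)
    else pvInnerA n d rest

def bucketize_lengths_py (lengths : List Int) : List (String × Int) :=
  let counts : PySem.Dict String Int :=
    pvBuckets.foldl (fun d b => d.insert b.2.2 0) PySem.Dict.empty
  (lengths.foldl (fun d n => pvInnerA n d pvBuckets) counts).items

-- ===== PORT B =====
def pvBoundaries : List Int := [100, 500, 2000, 10000]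
def pvLabels : List String := ["0-100", "100-500", "500-2000", "2000-10000", "10000+"]

-- _LABELS[idx]: idx = bisect_right ≤ 4 < 5 = len(_LABELS), so the getD default is never used (exact)
def pvStepB (d : PySem.Dict String Int) (n : Int) : PySem.Dict String Int :=
  if n ≥ 0 then
    d.modify (pvLabels.getD (PySem.List.bisectRight pvBoundaries n) "") 0 (· + 1)
  else d

def bucketize_lengths_py_alt (lengths : List Int) : List (String × Int) :=
  let counts : PySem.Dict String Int :=
    pvLabels.foldl (fun d label => d.insert label 0) PySem.Dict.empty
  (lengths.foldl pvStepB counts).items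


-- ===== PRECONDITION & SPEC =====
def Spec_bucketize_lengths_py (lengths : List Int) (out : List (String × Int)) : Prop := out = bucketize_lengths_py_alt lengths
instance (lengths : List Int) (out : List (String × Int)) : Decidable (Spec_bucketize_lengths_py lengths out) := by unfold Spec_bucketize_lengths_py; infer_instance

-- ===== CLAIM (what is proved, stated in full; the proofs are below) =====
def Claim_equal_bucketize_lengths_py : Prop := ∀ (lengths : List Int), Dom_bucketize_lengths_py lengths → Spec_bucketize_lengths_py lengths (bucketize_lengths_py lengths)

-- ===== LEMMAS AND PROOFS =====

theorem pvBisect_val (n : Int) :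
    PySem.List.bisectRight pvBoundaries n =
      if n < 100 then 0 else if n < 500 then 1 else if n < 2000 then 2
      else if n < 10000 then 3 else 4 := by
  obtain ⟨hle, hlo, hhi⟩ := PySem.List.bisectRight_spec pvBoundaries n (by decide)
  set k := PySem.List.bisectRight pvBoundaries n with hk
  have l0 := hlo 0 (by decide); have l1 := hlo 1 (by decide)
  have l2 := hlo 2 (by decide); have l3 := hlo 3 (by decide)
  have g0 := hhi 0 (by decide); have g1 := hhi 1 (by decide)
  have g2 := hhi 2 (by decide); have g3 := hhi 3 (by decide)
  simp only [pvBoundaries] at hle l0 l1 l2 l3 g0 g1 g2 g3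
  norm_num at hle l0 l1 l2 l3 g0 g1 g2 g3
  interval_cases k <;> split_ifs <;> simp_all <;> omega

theorem pvStep_eq (n : Int) (d : PySem.Dict String Int) :
    pvInnerA n d pvBuckets = pvStepB d n := by
  by_cases h0 : 0 ≤ n
  · by_cases h1 : n < 100
    · simp [pvBuckets, pvInnerA, pvStepB, pvLabels, pvBisect_val, h0, h1, ge_iff_le]
    · by_cases h2 : n < 500
      · simp [pvBuckets, pvInnerA, pvStepB, pvLabels, pvBisect_val, h0, h1, h2, ge_iff_le,
          (show (100:Int) ≤ n by omega)]
      · by_cases h3 : n < 2000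
        · simp [pvBuckets, pvInnerA, pvStepB, pvLabels, pvBisect_val, h0, h1, h2, h3, ge_iff_le,
            (show (100:Int) ≤ n by omega), (show (500:Int) ≤ n by omega)]
        · by_cases h4 : n < 10000
          · simp [pvBuckets, pvInnerA, pvStepB, pvLabels, pvBisect_val, h0, h1, h2, h3, h4,
              ge_iff_le, (show (100:Int) ≤ n by omega), (show (500:Int) ≤ n by omega),
              (show (2000:Int) ≤ n by omega)]
          · simp [pvBuckets, pvInnerA, pvStepB, pvLabels, pvBisect_val, h0, h1, h2, h3, h4,
              ge_iff_le, (show (100:Int) ≤ n by omega), (show (500:Int) ≤ n by omega),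
              (show (2000:Int) ≤ n by omega), (show (10000:Int) ≤ n by omega)]
  · have ha : ¬ (100:Int) ≤ n := by omega
    have hb : ¬ (500:Int) ≤ n := by omega
    have hc : ¬ (2000:Int) ≤ n := by omega
    have hd : ¬ (10000:Int) ≤ n := by omega
    simp [pvBuckets, pvInnerA, pvStepB, ge_iff_le, h0, ha, hb, hc, hd]

theorem pvFold_eq (lengths : List Int) (d : PySem.Dict String Int) :
    lengths.foldl (fun d n => pvInnerA n d pvBuckets) d = lengths.foldl pvStepB d := by
  simp only [pvStep_eq]

theorem pvInit_eq :
    pvBuckets.foldl (fun (d : PySem.Dict String Int) b => d.insert b.2.2 0) PySem.Dict.empty =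
      pvLabels.foldl (fun d label => d.insert label 0) PySem.Dict.empty := by
  decide

-- ===== VERDICT (by name: the statement is the Claim_ definition above) =====
theorem bucketize_lengths_py_spec : Claim_equal_bucketize_lengths_py := by
  intro lengths _
  unfold Spec_bucketize_lengths_py bucketize_lengths_py bucketize_lengths_py_alt
  simp only [pvFold_eq]
  exact congrArg (fun d => (List.foldl pvStepB d lengths).items) pvInit_eq
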